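-- pv_equiv track=rewrite | github.com/daniel-reich/ubiquitous-fiesta | xFme9FBuvHLveh5nE_19.py | is_zygodrome
-- ===== SOURCE A (Python) =====
-- def is_zygodrome(num):
--   if num < 10: return False
--   car, *cdr  = str(num)
--   for i in cdr:
--     if i in car:
--       car += i
--     else:
--       if len(car) < 2:
--         return False
--       else:
--         car = i
--   return True if len(car) > 1 else False
-- ===== SOURCE B (Python) =====
-- def is_zygodrome(num):
--     if num < 10:
--         return False
--     def ok(chars):
--         # recursion over runs: consume one maximal run per step
--         if not chars:
--             return True
--         run = 1
--         while run < len(chars) and chars[run] == chars[0]: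
--             run += 1
--         return run >= 2 and ok(chars[run:])
--     return ok(str(num))
-- ===== Notes on version B (the rewrite author's own statement) =====
-- stated objective: alternative
-- what changed: A scans the digits once with a growing run-accumulator string and early returns; B recurses over the digit list, consuming one maximal run per step and requiring each run's length to be at least 2.
import Mathlib
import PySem

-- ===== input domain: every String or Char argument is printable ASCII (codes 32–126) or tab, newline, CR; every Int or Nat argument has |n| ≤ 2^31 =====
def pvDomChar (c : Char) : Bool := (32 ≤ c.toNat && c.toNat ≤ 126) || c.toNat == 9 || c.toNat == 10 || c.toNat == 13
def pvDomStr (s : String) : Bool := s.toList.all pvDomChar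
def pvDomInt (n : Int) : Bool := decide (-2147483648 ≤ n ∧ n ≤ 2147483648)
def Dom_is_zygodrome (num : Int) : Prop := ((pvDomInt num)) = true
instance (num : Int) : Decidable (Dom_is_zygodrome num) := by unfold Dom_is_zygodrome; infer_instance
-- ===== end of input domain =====

-- B replaces A's single pass with a growing run-accumulator string by a recursion that
-- consumes one maximal run of equal digits per step; same behaviour, alternative decomposition.

-- ===== PORT A =====
-- the for-loop over cdr with state 'car' (the current run, as a list of chars) and early return
def pvALoop : List Char → List Char → Bool
  | car, [] => decide (car.length > 1)
  | car, i :: rest =>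
    if car.contains i then pvALoop (car ++ [i]) rest
    else if car.length < 2 then false
    else pvALoop [i] rest

def is_zygodrome (num : Int) : Bool :=
  if num < 10 then false
  else
    match (PySem.Int.toStr num).toList with
    | [] => false            -- unreachable: str(num) is never empty
    | c :: cdr => pvALoop [c] cdr

-- ===== PORT B =====
-- the while loop counting the leading run equal to chars[0] (run = 1 + pvRunLen c rest)
def pvRunLen (c : Char) : List Char → Nat
  | [] => 0
  | x :: xs => if x == c then 1 + pvRunLen c xs else 0

-- recursion over runs: consume one maximal run per step
def pvOk : List Char → Bool
  | [] => true
  | c :: rest =>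
    decide (1 + pvRunLen c rest ≥ 2) && pvOk (rest.drop (pvRunLen c rest))
termination_by l => l.length
decreasing_by simp [List.length_drop]

def is_zygodrome_alt (num : Int) : Bool :=
  if num < 10 then false
  else pvOk (PySem.Int.toStr num).toList

-- ===== PRECONDITION & SPEC =====
def Spec_is_zygodrome (num : Int) (out : Bool) : Prop := out = is_zygodrome_alt num
instance (num : Int) (out : Bool) : Decidable (Spec_is_zygodrome num out) := by unfold Spec_is_zygodrome; infer_instance

-- ===== CLAIM (what is proved, stated in full; the proofs are below) =====
def Claim_equal_is_zygodrome : Prop := ∀ (num : Int), Dom_is_zygodrome num → Spec_is_zygodrome num (is_zygodrome num)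

-- ===== LEMMAS AND PROOFS =====

theorem pvToDigits_ne_nil (n : Nat) : Nat.toDigits 10 n ≠ [] := by
  have key : ∀ (f m : Nat) (c : Char) (tl : List Char), Nat.toDigitsCore 10 f m (c :: tl) ≠ [] := by
    intro f m c tl h
    have h2 := Nat.toDigitsCore_lens_eq 10 f m c tl
    rw [h] at h2
    simp at h2
  show (if n / 10 = 0 then [(n % 10).digitChar] else Nat.toDigitsCore 10 n (n / 10) [(n % 10).digitChar]) ≠ []
  split
  · simp
  · exact key _ _ _ _

theorem pvToChars_ne_nil (n : Int) : PySem.Int.toChars n ≠ [] := by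
  unfold PySem.Int.toChars
  split
  · simp
  · exact pvToDigits_ne_nil _

-- invariant: A's 'car' is always a nonempty run of one repeated char, and with such a car
-- the rest of A's loop computes exactly B's runwise recursion
theorem pvALoop_replicate (l : List Char) : ∀ (c : Char) (k : Nat), 1 ≤ k →
    pvALoop (List.replicate k c) l
      = (decide (k + pvRunLen c l ≥ 2) && pvOk (l.drop (pvRunLen c l))) := by
  induction l with
  | nil =>
    intro c k hk
    rw [pvALoop]
    have h0 : pvRunLen c [] = 0 := rfl
    rw [h0, List.drop_nil, pvOk]
    simp
    omega
  | cons i rest ih =>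
    intro c k hk
    by_cases hic : i = c
    · subst hic
      have hcont : (List.replicate k i).contains i = true := by
        simp [List.mem_replicate]; omega
      have hrep : List.replicate k i ++ [i] = List.replicate (k + 1) i := by
        simp [List.replicate_succ']
      rw [pvALoop, hcont, if_pos rfl, hrep, ih i (k+1) (by omega)]
      have h1 : pvRunLen i (i :: rest) = 1 + pvRunLen i rest := by
        simp [pvRunLen]
      rw [h1]
      have h2 : (k + (1 + pvRunLen i rest) ≥ 2) ↔ (k + 1 + pvRunLen i rest ≥ 2) := by omega
      have h3 : List.drop (1 + pvRunLen i rest) (i :: rest) = List.drop (pvRunLen i rest) rest := by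
        rw [Nat.add_comm]
        rfl
      rw [h3]
      simp [h2]
    · have hcont : (List.replicate k c).contains i = false := by
        simp [List.mem_replicate]
        intro _; exact hic
      have hrl : pvRunLen c (i :: rest) = 0 := by
        simp [pvRunLen, hic]
      rw [pvALoop, hcont]
      simp only [Bool.false_eq_true, if_false, hrl, List.drop_zero, List.length_replicate]
      by_cases hk2 : k < 2
      · rw [if_pos hk2]
        have hd : (decide (k + 0 ≥ 2)) = false := by simp; omega
        rw [hd]
        simp
      · rw [if_neg hk2]
        have h1 : pvALoop [i] rest = pvALoop (List.replicate 1 i) rest := rfl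
        rw [h1, ih i 1 (by omega), pvOk]
        have hd : (decide (k + 0 ≥ 2)) = true := by simp; omega
        rw [hd]
        simp

-- ===== VERDICT (by name: the statement is the Claim_ definition above) =====
theorem is_zygodrome_spec : Claim_equal_is_zygodrome := by
  intro num _
  unfold Spec_is_zygodrome is_zygodrome is_zygodrome_alt
  by_cases h : num < 10
  · simp [h]
  · rw [if_neg h, if_neg h]
    cases hl : (PySem.Int.toStr num).toList with
    | nil =>
      exfalso
      rw [PySem.Int.toList_toStr] at hl
      exact pvToChars_ne_nil num hl
    | cons c cdr =>
      show pvALoop [c] cdr = pvOk (c :: cdr)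
      have h1 : [c] = List.replicate 1 c := rfl
      rw [h1, pvALoop_replicate cdr c 1 (by omega), pvOk]
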